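-- pv_equiv track=rewrite | github.com/ungersebastian/AdventOfCode23 | Day3/day3.py | get_number_list
-- ===== SOURCE A (Python) =====
-- from typing import List, Dict
--
-- def unique_symbols(line: str) -> List[str]:
--     symbols = list(set(line))
--     unique = []
--     for v in symbols:
--         if not v.isnumeric():
--             unique.append(v)
--     return unique
--
-- def get_numbers(line: str) -> List[int]:
--     symbols = unique_symbols(line)
--     for s in symbols:
--         line = line.replace(s, '.')
--     result = [int(char) for char in line.split('.') if char]
--     return result
--
-- def get_number_list(line: str, y: int) -> List[int]:
--     numbers = get_numbers(line)
--     result = []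
--     n = -1
--     start = 0
--     end = 0
--     in_number = False
--     for i, c in enumerate(line):
--         if c.isnumeric():
--             if not in_number:
--                 n += 1
--                 start = i
--                 end = i + len(str(numbers[n]))
--                 result.append([start, end, y, numbers[n]])
--                 in_number = True
--
--         else:
--             in_number = False
--     return result
-- ===== SOURCE B (Python) =====
-- def get_number_list(line: str, y: int) -> list:
--     # One left-to-right pass: scan each maximal digit run, accumulating its value
--     # inline; emit [start, start + len(str(value)), y, value] when the run ends.
--     result = []
--     run_start = -1
--     val = 0
--     for i, c in enumerate(line):
--         if '0' <= c <= '9':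
--             if run_start < 0:
--                 run_start = i
--                 val = 0
--             val = val * 10 + (ord(c) - 48)
--         else:
--             if run_start >= 0:
--                 result.append([run_start, run_start + len(str(val)), y, val])
--                 run_start = -1
--     if run_start >= 0:
--         result.append([run_start, run_start + len(str(val)), y, val])
--     return result
-- ===== Notes on version B (the rewrite author's own statement) =====
-- stated objective: faster
-- what changed: A builds the number list in three extra passes (dedupe the line's symbols via set, replace every non-digit symbol with '.' one replace-pass per distinct symbol, split and int-parse) and then re-scans the line with an in_number flag indexing that list; B makes one left-to-right pass that detects each maximal digit run and accumulates its value inline, emitting [start, start+len(str(value)), y, value] as the run ends.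
import Mathlib
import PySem

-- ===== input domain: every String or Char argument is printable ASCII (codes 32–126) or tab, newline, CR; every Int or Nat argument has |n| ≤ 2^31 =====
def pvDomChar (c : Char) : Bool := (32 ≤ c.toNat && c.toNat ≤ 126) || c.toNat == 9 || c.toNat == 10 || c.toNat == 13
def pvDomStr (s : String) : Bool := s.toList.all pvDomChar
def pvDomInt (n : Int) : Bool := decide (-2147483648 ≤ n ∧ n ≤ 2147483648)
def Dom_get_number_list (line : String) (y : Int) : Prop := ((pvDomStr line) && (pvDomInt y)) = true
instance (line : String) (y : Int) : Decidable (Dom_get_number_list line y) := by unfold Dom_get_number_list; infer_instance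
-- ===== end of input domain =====

-- B replaces A's four passes (set dedup, per-symbol replace, split, parse + flag scan
-- indexing a precomputed list) by one left-to-right pass over the digit runs; same values.

-- ===== PORT A =====

/-- Port of `unique_symbols`: `list(set(line))` — the distinct characters (the Python
    set's iteration order is irrelevant: the only use below is an order-independent
    per-character replacement) — then keep the non-numeric ones.  On the printable-ASCII
    domain `str.isnumeric` on a 1-character string is `PySem.Str.strIsdigit`. -/
def unique_symbols (line : String) : List String :=
  let symbols : List Char := PySem.Set.ofList line.toList
  symbols.foldl
    (fun unique v =>
      if !PySem.Str.strIsdigit (String.ofList [v]) then unique ++ [String.ofList [v]]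
      else unique)
    []

/-- `int(piece)` as it occurs in `get_numbers`: every piece reaching `int` there is a
    nonempty run of '0'..'9' (every other character was replaced by '.'), and on such
    strings Python's `int` is exactly this decimal fold (hand port; `PySem.Int.ofStr?`
    agrees there but is built from private helpers the proofs below could not cite). -/
def pyIntOfDigits (cs : List Char) : Int :=
  cs.foldl (fun a c => a * 10 + ((c.toNat : Int) - 48)) 0

/-- Port of `get_numbers`.  `split?` is never `none` (the separator "." is nonempty). -/
def get_numbers (line : String) : List Int :=
  let symbols := unique_symbols line
  let line2 := symbols.foldl (fun l s => PySem.Str.replace l s ".") line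
  (((PySem.Str.split? line2 ".").getD []).filter (fun c => c ≠ "")).map
    (fun c => pyIntOfDigits c.toList)

/-- Loop body of A's scan; state is (result, n, in_number).  `numbers[n]` is always in
    range — `get_numbers` yields exactly one number per digit run — so the total
    `pyGetD` is exact for the `numbers[n]` subscript. -/
def aStep (numbers : List Int) (y : Int) (st : List (List Int) × Int × Bool)
    (ic : Int × Char) : List (List Int) × Int × Bool :=
  if PySem.Chars.isdigit ic.2 then
    if !st.2.2 then
      let n := st.2.1 + 1
      let start := ic.1
      let nv := PySem.List.pyGetD numbers n 0
      let stop := start + PySem.Str.len (PySem.Int.toStr nv)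
      (st.1 ++ [[start, stop, y, nv]], n, true)
    else st
  else (st.1, st.2.1, false)

def get_number_list (line : String) (y : Int) : List (List Int) :=
  let numbers := get_numbers line
  ((PySem.List.enumerate line.toList 0).foldl (aStep numbers y) ([], -1, false)).1

-- ===== PORT B =====

/-- Loop body of B's single pass; state is (result, run_start, val). -/
def altStep (y : Int) (st : List (List Int) × Int × Int) (ic : Int × Char) :
    List (List Int) × Int × Int :=
  if '0' ≤ ic.2 ∧ ic.2 ≤ '9' then
    let run_start := if st.2.1 < 0 then ic.1 else st.2.1
    let val := if st.2.1 < 0 then 0 else st.2.2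
    (st.1, run_start, val * 10 + ((ic.2.toNat : Int) - 48))
  else if 0 ≤ st.2.1 then
    (st.1 ++ [[st.2.1, st.2.1 + PySem.Str.len (PySem.Int.toStr st.2.2), y, st.2.2]], -1, st.2.2)
  else st

def get_number_list_alt (line : String) (y : Int) : List (List Int) :=
  let st := (PySem.List.enumerate line.toList 0).foldl (altStep y) ([], -1, 0)
  if 0 ≤ st.2.1 then
    st.1 ++ [[st.2.1, st.2.1 + PySem.Str.len (PySem.Int.toStr st.2.2), y, st.2.2]]
  else st.1

-- ===== PRECONDITION & SPEC =====
def Spec_get_number_list (line : String) (y : Int) (out : List (List Int)) : Prop := out = get_number_list_alt line y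
instance (line : String) (y : Int) (out : List (List Int)) : Decidable (Spec_get_number_list line y out) := by unfold Spec_get_number_list; infer_instance

-- ===== CLAIM (what is proved, stated in full; the proofs are below) =====
def Claim_equal_get_number_list : Prop := ∀ (line : String) (y : Int), Dom_get_number_list line y → Spec_get_number_list line y (get_number_list line y)

-- ===== LEMMAS AND PROOFS =====

/-- Abbreviation for the digit test both programs use. -/
def dg : Char → Bool := PySem.Chars.isdigit

theorem dg_iff (c : Char) : dg c = true ↔ ('0' ≤ c ∧ c ≤ '9') := by
  simp [dg, PySem.Chars.isdigit]

/-- The maximal digit runs of `cs`, with their start positions (first position `k`). -/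
def runs (cs : List Char) (k : Int) : List (Int × List Char) :=
  match cs with
  | [] => []
  | c :: t =>
    if dg c then
      (k, c :: t.takeWhile dg) :: runs (t.dropWhile dg) (k + 1 + (t.takeWhile dg).length)
    else runs t (k + 1)
termination_by cs.length
decreasing_by
  · simpa using Nat.lt_succ_of_le (List.length_dropWhile_le dg t)
  · simp

/-- Just the run contents (independent of positions). -/
def runsL (cs : List Char) : List (List Char) :=
  match cs with
  | [] => []
  | c :: t =>
    if dg c then (c :: t.takeWhile dg) :: runsL (t.dropWhile dg) else runsL t
termination_by cs.length
decreasing_by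
  · simpa using Nat.lt_succ_of_le (List.length_dropWhile_le dg t)
  · simp

theorem runs_nil (k : Int) : runs [] k = [] := by rw [runs]

theorem runs_cons_pos {c : Char} (t : List Char) (k : Int) (h : dg c = true) :
    runs (c :: t) k
      = (k, c :: t.takeWhile dg) :: runs (t.dropWhile dg) (k + 1 + (t.takeWhile dg).length) := by
  rw [runs]; simp [h]

theorem runs_cons_neg {c : Char} (t : List Char) (k : Int) (h : dg c = false) :
    runs (c :: t) k = runs t (k + 1) := by
  rw [runs]; simp [h]

theorem runsL_nil : runsL [] = [] := by rw [runsL]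

theorem runsL_cons_pos {c : Char} (t : List Char) (h : dg c = true) :
    runsL (c :: t) = (c :: t.takeWhile dg) :: runsL (t.dropWhile dg) := by
  rw [runsL]; simp [h]

theorem runsL_cons_neg {c : Char} (t : List Char) (h : dg c = false) :
    runsL (c :: t) = runsL t := by
  rw [runsL]; simp [h]

/-- `pyIntOfDigits` with an explicit accumulator (the loop invariant of B's value). -/
def valI' (v : Int) (cs : List Char) : Int :=
  cs.foldl (fun a c => a * 10 + ((c.toNat : Int) - 48)) v

def mkEntry (y v s : Int) : List Int :=
  [s, s + PySem.Str.len (PySem.Int.toStr v), y, v]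

def flushB (y : Int) (st : List (List Int) × Int × Int) : List (List Int) :=
  if 0 ≤ st.2.1 then st.1 ++ [mkEntry y st.2.2 st.2.1] else st.1

theorem alt_eq_flushB (line : String) (y : Int) :
    get_number_list_alt line y
      = flushB y ((PySem.List.enumerate line.toList 0).foldl (altStep y) ([], -1, 0)) := rfl

-- ---- replace / split machinery (A's masking passes) ----

theorem replace_go_single (p : Char) (new : List Char) :
    ∀ (l : List Char) (fuel : Nat), l.length ≤ fuel → ∀ (acc : List Char),
      PySem.Chars.replace.go [p] new fuel l acc
        = acc.reverse ++ l.flatMap (fun c => if c = p then new else [c]) := by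
  intro l
  induction l with
  | nil =>
    intro fuel _ acc
    rw [PySem.Chars.replace.go.eq_def]
    cases fuel <;> simp
  | cons c t ih =>
    intro fuel hf acc
    cases fuel with
    | zero => simp at hf
    | succ f =>
      rw [PySem.Chars.replace.go.eq_def]
      simp only [List.isPrefixOf, List.flatMap_cons]
      by_cases hc : c = p
      · subst hc
        simp only [BEq.rfl, Bool.true_and, if_pos,
          List.length_cons, List.length_nil, Nat.zero_add, List.drop_succ_cons, List.drop_zero]
        rw [ih f (by simpa using Nat.le_of_succ_le_succ hf)]
        simp
      · have hb : (p == c) = false := by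
          simp only [beq_eq_false_iff_ne, ne_eq]; exact fun h => hc h.symm
        rw [if_neg (by simp [hb])]
        rw [ih f (by simpa using Nat.le_of_succ_le_succ hf)]
        simp [if_neg hc]

theorem replaceChar (p : Char) (l : List Char) :
    PySem.Chars.replace l [p] ['.'] = l.map (fun c => if c = p then '.' else c) := by
  unfold PySem.Chars.replace
  rw [if_neg (by simp)]
  rw [replace_go_single p ['.'] l l.length le_rfl []]
  simp only [List.reverse_nil, List.nil_append]
  induction l with
  | nil => simp
  | cons c t ih =>
    by_cases hc : c = p <;> simp [hc, ih]

/-- Reference split on '.' . -/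
def splitDot : List Char → List Char → List (List Char)
  | pre, [] => [pre]
  | pre, c :: t => if c = '.' then pre :: splitDot [] t else splitDot (pre ++ [c]) t

theorem splitOn_go_dot :
    ∀ (l : List Char) (fuel : Nat), l.length ≤ fuel → ∀ (cur : List Char) (acc : List (List Char)),
      PySem.Chars.splitOn.go ['.'] fuel l cur acc = acc.reverse ++ splitDot cur.reverse l := by
  intro l
  induction l with
  | nil =>
    intro fuel _ cur acc
    rw [PySem.Chars.splitOn.go.eq_def]
    cases fuel <;> simp [splitDot]
  | cons c t ih =>
    intro fuel hf cur acc
    cases fuel with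
    | zero => simp at hf
    | succ f =>
      rw [PySem.Chars.splitOn.go.eq_def]
      simp only [List.isPrefixOf, Bool.and_true]
      by_cases hc : c = '.'
      · subst hc
        simp only [BEq.rfl, if_pos, List.length_cons, List.length_nil, Nat.zero_add,
          List.drop_succ_cons, List.drop_zero]
        rw [ih f (by simpa using Nat.le_of_succ_le_succ hf)]
        simp [splitDot]
      · have hb : ('.' == c) = false := by
          simp only [beq_eq_false_iff_ne, ne_eq]; exact fun h => hc h.symm
        rw [if_neg (by simp [hb])]
        rw [ih f (by simpa using Nat.le_of_succ_le_succ hf)]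
        simp [splitDot, hc]

theorem splitOn_dot (l : List Char) : PySem.Chars.splitOn l ['.'] = splitDot [] l := by
  unfold PySem.Chars.splitOn
  rw [splitOn_go_dot l (l.length + 1) (by omega) [] []]
  simp

def mask (c : Char) : Char := if dg c then c else '.'

theorem unique_symbols_eq (line : String) :
    unique_symbols line
      = ((PySem.Set.ofList line.toList).filter (fun v => !PySem.Chars.strIsdigit [v])).map
          (fun v => String.ofList [v]) := by
  unfold unique_symbols
  rw [PySem.List.foldl_append_if (fun v => !PySem.Str.strIsdigit (String.ofList [v]))
      (fun v => String.ofList [v]) _ []]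
  simp [PySem.Str.strIsdigit]

theorem foldl_replace_toList :
    ∀ (qs : List Char) (s : String),
      (qs.foldl (fun l p => PySem.Str.replace l (String.ofList [p]) ".") s).toList
        = qs.foldl (fun ls p => ls.map (fun c => if c = p then '.' else c)) s.toList := by
  intro qs
  induction qs with
  | nil => intro s; simp
  | cons p qs ih =>
    intro s
    simp only [List.foldl_cons]
    rw [ih]
    congr 1
    rw [PySem.Str.toList_replace]
    have h1 : (String.ofList [p]).toList = [p] := by simp
    have h2 : ("." : String).toList = ['.'] := rfl
    rw [h1, h2, replaceChar]

theorem foldl_mapsubst (qs : List Char) : ∀ (ls : List Char),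
    qs.foldl (fun ls p => ls.map (fun c => if c = p then '.' else c)) ls
      = ls.map (fun c => if c ∈ qs then '.' else c) := by
  induction qs with
  | nil => intro ls; simp
  | cons p qs ih =>
    intro ls
    simp only [List.foldl_cons]
    rw [ih, List.map_map]
    apply List.map_congr_left
    intro a _
    by_cases hap : a = p
    · subst hap
      by_cases hdq : '.' ∈ qs <;> simp [hdq]
    · by_cases haq : a ∈ qs <;> simp [hap, haq, Function.comp]

theorem line2_toList (line : String) :
    ((unique_symbols line).foldl (fun l s => PySem.Str.replace l s ".") line).toList
      = line.toList.map mask := by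
  rw [unique_symbols_eq, List.foldl_map, foldl_replace_toList, foldl_mapsubst]
  apply List.map_congr_left
  intro a ha
  by_cases hd : dg a
  · have : a ∉ (PySem.Set.ofList line.toList).filter (fun v => !PySem.Chars.strIsdigit [v]) := by
      simp [List.mem_filter, PySem.Chars.strIsdigit]
      intro _
      simpa [dg] using hd
    simp [mask, this, hd]
  · have : a ∈ (PySem.Set.ofList line.toList).filter (fun v => !PySem.Chars.strIsdigit [v]) := by
      rw [List.mem_filter]
      refine ⟨(PySem.Set.mem_ofList _ _).2 ha, ?_⟩
      simp [PySem.Chars.strIsdigit]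
      simpa [dg] using hd
    simp [mask, this, hd]

theorem dot_not_dg : dg '.' = false := by decide

theorem dg_ne_dot {c : Char} (h : dg c = true) : c ≠ '.' := by
  intro he; subst he; simp [dot_not_dg] at h

theorem splitDot_runsL :
    ∀ (n : Nat) (cs : List Char), cs.length ≤ n →
      ((splitDot [] (cs.map mask)).filter (fun r => decide (r ≠ [])) = runsL cs)
      ∧ ∀ pre, pre ≠ [] →
          (splitDot pre (cs.map mask)).filter (fun r => decide (r ≠ []))
            = (pre ++ cs.takeWhile dg) :: runsL (cs.dropWhile dg) := by
  intro n
  induction n with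
  | zero =>
    intro cs h
    have : cs = [] := by cases cs <;> simp_all
    subst this
    constructor
    · simp [splitDot, runsL_nil]
    · intro pre hpre; simp [splitDot, runsL_nil, hpre]
  | succ n ih =>
    intro cs h
    cases cs with
    | nil =>
      constructor
      · simp [splitDot, runsL_nil]
      · intro pre hpre; simp [splitDot, runsL_nil, hpre]
    | cons c t =>
      have ht : t.length ≤ n := by simpa using Nat.le_of_succ_le_succ h
      by_cases hd : dg c
      · have hmask : mask c = c := by simp [mask, hd]
        have hne : c ≠ '.' := dg_ne_dot hd
        constructor
        · simp only [List.map_cons, hmask, splitDot, if_neg hne, List.nil_append]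
          rw [(ih t ht).2 [c] (by simp)]
          rw [runsL_cons_pos t hd]
          simp
        · intro pre hpre
          simp only [List.map_cons, hmask, splitDot, if_neg hne]
          rw [(ih t ht).2 (pre ++ [c]) (by simp)]
          rw [List.takeWhile_cons_of_pos hd, List.dropWhile_cons_of_pos hd]
          simp
      · have hmask : mask c = '.' := by simp [mask, hd]
        have hb : dg c = false := by simpa using hd
        constructor
        · simp only [List.map_cons, hmask, splitDot, reduceIte]
          rw [List.filter_cons]
          rw [(ih t ht).1, runsL_cons_neg t hb]
          simp
        · intro pre hpre
          simp only [List.map_cons, hmask, splitDot, reduceIte]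
          rw [List.filter_cons]
          have hkeep : (decide (pre ≠ [])) = true := by simpa using hpre
          rw [List.takeWhile_cons_of_neg (by simp [hb]), List.dropWhile_cons_of_neg (by simp [hb])]
          rw [(ih t ht).1, runsL_cons_neg t hb]
          simp [hkeep]

theorem get_numbers_eq (line : String) :
    get_numbers line = (runsL line.toList).map pyIntOfDigits := by
  unfold get_numbers
  have h1 : (PySem.Str.split?
      ((unique_symbols line).foldl (fun l s => PySem.Str.replace l s ".") line) ".").getD []
      = (splitDot [] (line.toList.map mask)).map String.ofList := by
    simp only [PySem.Str.split?, PySem.Chars.split?]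
    rw [if_neg (by decide)]
    have hsep : ("." : String).toList = ['.'] := rfl
    rw [hsep, line2_toList, splitOn_dot]
    rfl
  simp only []
  rw [h1]
  rw [List.filter_map]
  have h2 : ((fun (c : String) => decide ¬c = "") ∘ String.ofList) = (fun r => decide (r ≠ [])) := by
    funext r
    simp [Function.comp]
  rw [h2]
  rw [(splitDot_runsL (line.toList.length) line.toList le_rfl).1]
  rw [List.map_map]
  apply List.map_congr_left
  intro r _
  simp [Function.comp]

-- ---- the two scans, as functions of the runs ----

theorem runs_snd : ∀ (n : Nat) (cs : List Char), cs.length ≤ n → ∀ k : Int,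
    (runs cs k).map Prod.snd = runsL cs := by
  intro n
  induction n with
  | zero =>
    intro cs h k
    have : cs = [] := by cases cs <;> simp_all
    subst this; simp [runs_nil, runsL_nil]
  | succ n ih =>
    intro cs h k
    cases cs with
    | nil => simp [runs_nil, runsL_nil]
    | cons c t =>
      have ht : t.length ≤ n := by simpa using Nat.le_of_succ_le_succ h
      by_cases hd : dg c
      · rw [runs_cons_pos t k hd, runsL_cons_pos t hd]
        simp only [List.map_cons]
        rw [ih _ (le_trans (List.length_dropWhile_le dg t) ht)]
      · have hb : dg c = false := by simpa using hd
        rw [runs_cons_neg t k hb, runsL_cons_neg t hb, ih t ht]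

theorem foldB_spec (y : Int) :
    ∀ (n : Nat) (cs : List Char), cs.length ≤ n → ∀ (k : Int), 0 ≤ k →
      ∀ (res : List (List Int)) (v : Int),
      (flushB y ((PySem.List.enumerate cs k).foldl (altStep y) (res, -1, v))
        = res ++ (runs cs k).map (fun p => mkEntry y (pyIntOfDigits p.2) p.1))
      ∧ ∀ (s w : Int), 0 ≤ s →
          flushB y ((PySem.List.enumerate cs k).foldl (altStep y) (res, s, w))
            = res ++ mkEntry y (valI' w (cs.takeWhile dg)) s
                :: (runs (cs.dropWhile dg) (k + (cs.takeWhile dg).length)).map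
                     (fun p => mkEntry y (pyIntOfDigits p.2) p.1) := by
  intro n
  induction n with
  | zero =>
    intro cs h k hk res v
    have : cs = [] := by cases cs <;> simp_all
    subst this
    constructor
    · simp [PySem.List.enumerate, runs_nil, flushB]
    · intro s w hs
      simp [PySem.List.enumerate, runs_nil, flushB, if_pos hs, valI', mkEntry]
  | succ n ih =>
    intro cs h k hk res v
    cases cs with
    | nil =>
      constructor
      · simp [PySem.List.enumerate, runs_nil, flushB]
      · intro s w hs
        simp [PySem.List.enumerate, runs_nil, flushB, if_pos hs, valI', mkEntry]
    | cons c t =>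
      have ht : t.length ≤ n := by simpa using Nat.le_of_succ_le_succ h
      constructor
      · -- not inside a run
        rw [PySem.List.enumerate_cons, List.foldl_cons]
        by_cases hd : dg c
        · have hp : '0' ≤ c ∧ c ≤ '9' := (dg_iff c).1 hd
          have hstep : altStep y (res, -1, v) (k, c)
              = (res, k, 0 * 10 + ((c.toNat : Int) - 48)) := by
            simp [altStep, hp]
          rw [hstep]
          rw [(ih t ht (k + 1) (by omega) res v).2 k (0 * 10 + ((c.toNat : Int) - 48)) hk]
          rw [runs_cons_pos t k hd]
          simp only [List.map_cons]
          have hval : valI' (0 * 10 + ((c.toNat : Int) - 48)) (t.takeWhile dg)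
              = pyIntOfDigits (c :: t.takeWhile dg) := rfl
          rw [hval]
        · have hb : dg c = false := by simpa using hd
          have hnp : ¬ ('0' ≤ c ∧ c ≤ '9') := fun hp => by simp [(dg_iff c).2 hp] at hb
          have hstep : altStep y (res, -1, v) (k, c) = (res, -1, v) := by
            simp [altStep, hnp]
          rw [hstep]
          rw [(ih t ht (k + 1) (by omega) res v).1]
          rw [runs_cons_neg t k hb]
      · -- inside a run started at s with value w
        intro s w hs
        rw [PySem.List.enumerate_cons, List.foldl_cons]
        by_cases hd : dg c
        · have hp : '0' ≤ c ∧ c ≤ '9' := (dg_iff c).1 hd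
          have hstep : altStep y (res, s, w) (k, c)
              = (res, s, w * 10 + ((c.toNat : Int) - 48)) := by
            simp [altStep, hp, show ¬ (s < 0) by omega]
          rw [hstep]
          rw [(ih t ht (k + 1) (by omega) res v).2 s (w * 10 + ((c.toNat : Int) - 48)) hs]
          have hval : valI' (w * 10 + ((c.toNat : Int) - 48)) (t.takeWhile dg)
              = valI' w (c :: t.takeWhile dg) := rfl
          have hidx : (k + 1 + ((t.takeWhile dg).length : Int))
              = k + (((c :: t).takeWhile dg).length : Int) := by
            rw [List.takeWhile_cons_of_pos hd]
            simp only [List.length_cons]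
            omega
          rw [hval, hidx, List.dropWhile_cons_of_pos hd, List.takeWhile_cons_of_pos hd]
        · have hb : dg c = false := by simpa using hd
          have hnp : ¬ ('0' ≤ c ∧ c ≤ '9') := fun hp => by simp [(dg_iff c).2 hp] at hb
          have hstep : altStep y (res, s, w) (k, c)
              = (res ++ [[s, s + PySem.Str.len (PySem.Int.toStr w), y, w]], -1, w) := by
            simp [altStep, hnp, if_pos hs]
          rw [hstep]
          rw [(ih t ht (k + 1) (by omega) _ w).1]
          rw [List.takeWhile_cons_of_neg (by simp [hb]), List.dropWhile_cons_of_neg (by simp [hb])]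
          simp only [List.length_nil, Nat.cast_zero, add_zero]
          rw [runs_cons_neg t k hb]
          simp [valI', mkEntry]

theorem foldA_spec (nums : List Int) (y : Int) :
    ∀ (n : Nat) (cs : List Char), cs.length ≤ n → ∀ (k : Int)
      (res : List (List Int)) (m : Nat),
      ((runs cs k).length + m ≤ nums.length →
        ((PySem.List.enumerate cs k).foldl (aStep nums y) (res, (m : Int) - 1, false)).1
          = res ++ ((runs cs k).zip (nums.drop m)).map (fun q => mkEntry y q.2 q.1.1))
      ∧ ((runs (cs.dropWhile dg) (k + (cs.takeWhile dg).length)).length + m ≤ nums.length →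
        ((PySem.List.enumerate cs k).foldl (aStep nums y) (res, (m : Int) - 1, true)).1
          = res ++ ((runs (cs.dropWhile dg) (k + (cs.takeWhile dg).length)).zip
              (nums.drop m)).map (fun q => mkEntry y q.2 q.1.1)) := by
  intro n
  induction n with
  | zero =>
    intro cs h k res m
    have : cs = [] := by cases cs <;> simp_all
    subst this
    constructor
    · intro _; simp [PySem.List.enumerate, runs_nil]
    · intro _; simp [PySem.List.enumerate, runs_nil]
  | succ n ih =>
    intro cs h k res m
    cases cs with
    | nil =>
      constructor
      · intro _; simp [PySem.List.enumerate, runs_nil]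
      · intro _; simp [PySem.List.enumerate, runs_nil]
    | cons c t =>
      have ht : t.length ≤ n := by simpa using Nat.le_of_succ_le_succ h
      constructor
      · -- in_number = False
        intro hlen
        rw [PySem.List.enumerate_cons, List.foldl_cons]
        by_cases hd : dg c
        · have hd' : PySem.Chars.isdigit c = true := hd
          rw [runs_cons_pos t k hd] at hlen ⊢
          have hmlt : m < nums.length := by
            simp only [List.length_cons] at hlen; omega
          have hm1 : (m : Int) - 1 + 1 = (m : Int) := by ring
          have hstep : aStep nums y (res, (m : Int) - 1, false) (k, c)
              = (res ++ [[k, k + PySem.Str.len (PySem.Int.toStr (nums.getD m 0)), y,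
                  nums.getD m 0]], (m : Int), true) := by
            simp [aStep, hd', hm1, PySem.List.pyGetD_natCast]
          rw [hstep]
          have hm2 : (m : Int) = ((m + 1 : Nat) : Int) - 1 := by push_cast; ring
          rw [hm2]
          have hlen2 : (runs (t.dropWhile dg) ((k + 1) + ((t.takeWhile dg).length : Int))).length
              + (m + 1) ≤ nums.length := by
            have harr : ((k:Int) + 1) + ((t.takeWhile dg).length : Int)
                = k + 1 + ((t.takeWhile dg).length : Int) := by ring
            rw [harr]
            simp only [List.length_cons] at hlen; omega
          have hrec := (ih t ht (k + 1) (res ++ [[k,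
              k + PySem.Str.len (PySem.Int.toStr (nums.getD m 0)), y, nums.getD m 0]])
              (m + 1)).2 hlen2
          rw [hrec]
          rw [List.drop_eq_getElem_cons hmlt]
          rw [List.zip_cons_cons, List.map_cons]
          rw [List.getD_eq_getElem nums 0 hmlt]
          simp only [mkEntry, List.append_assoc, List.singleton_append]
        · have hb : dg c = false := by simpa using hd
          have hb' : PySem.Chars.isdigit c = false := hb
          rw [runs_cons_neg t k hb] at hlen ⊢
          have hstep : aStep nums y (res, (m : Int) - 1, false) (k, c)
              = (res, (m : Int) - 1, false) := by
            simp [aStep, hb']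
          rw [hstep]
          exact (ih t ht (k + 1) res m).1 hlen
      · -- in_number = True
        intro hlen
        rw [PySem.List.enumerate_cons, List.foldl_cons]
        by_cases hd : dg c
        · have hd' : PySem.Chars.isdigit c = true := hd
          have hstep : aStep nums y (res, (m : Int) - 1, true) (k, c)
              = (res, (m : Int) - 1, true) := by
            simp [aStep, hd']
          rw [hstep]
          have hidx : (k + 1 + ((t.takeWhile dg).length : Int))
              = k + (((c :: t).takeWhile dg).length : Int) := by
            rw [List.takeWhile_cons_of_pos hd]
            simp only [List.length_cons]
            omega
          have h2 := (ih t ht (k + 1) res m).2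
          rw [show ((k:Int) + 1) + ((t.takeWhile dg).length : Int)
              = k + 1 + ((t.takeWhile dg).length : Int) from by ring] at h2
          rw [hidx] at h2
          rw [List.dropWhile_cons_of_pos hd] at *
          exact h2 (by rw [← List.dropWhile_cons_of_pos (p := dg) hd] at hlen ⊢; exact hlen)
        · have hb : dg c = false := by simpa using hd
          have hb' : PySem.Chars.isdigit c = false := hb
          have hstep : aStep nums y (res, (m : Int) - 1, true) (k, c)
              = (res, (m : Int) - 1, false) := by
            simp [aStep, hb']
          rw [hstep]
          rw [List.takeWhile_cons_of_neg (by simp [hb]), List.dropWhile_cons_of_neg (by simp [hb])]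
            at hlen ⊢
          simp only [List.length_nil, Nat.cast_zero, add_zero] at hlen ⊢
          rw [runs_cons_neg t k hb] at hlen ⊢
          exact (ih t ht (k + 1) res m).1 hlen

theorem zip_map_self {α β γ : Type} (l : List α) (f : α → β) (g : α × β → γ) :
    (l.zip (l.map f)).map g = l.map (fun x => g (x, f x)) := by
  induction l with
  | nil => simp
  | cons a t ih => simp [ih]

theorem main_eq (line : String) (y : Int) :
    get_number_list line y = get_number_list_alt line y := by
  have hnums : get_numbers line = (runsL line.toList).map pyIntOfDigits :=
    get_numbers_eq line
  have hsnd : (runs line.toList 0).map Prod.snd = runsL line.toList :=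
    runs_snd line.toList.length line.toList le_rfl 0
  have hlen : (runs line.toList 0).length + 0 ≤ (get_numbers line).length := by
    rw [hnums, ← hsnd]
    simp
  -- A's scan, as a map over the digit runs
  have hA : get_number_list line y
      = (runs line.toList 0).map (fun p => mkEntry y (pyIntOfDigits p.2) p.1) := by
    unfold get_number_list
    have hinit : ((-1 : Int)) = ((0 : Nat) : Int) - 1 := by norm_num
    rw [hinit]
    rw [(foldA_spec (get_numbers line) y line.toList.length line.toList le_rfl 0 [] 0).1 hlen]
    rw [List.drop_zero, hnums, ← hsnd, List.map_map]
    rw [zip_map_self (runs line.toList 0) (pyIntOfDigits ∘ Prod.snd)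
        (fun q => mkEntry y q.2 q.1.1)]
    simp
  -- B's scan, as the same map
  have hB : get_number_list_alt line y
      = (runs line.toList 0).map (fun p => mkEntry y (pyIntOfDigits p.2) p.1) := by
    rw [alt_eq_flushB]
    rw [(foldB_spec y line.toList.length line.toList le_rfl 0 le_rfl [] 0).1]
    simp
  rw [hA, hB]

-- ===== VERDICT (by name: the statement is the Claim_ definition above) =====
theorem get_number_list_spec : Claim_equal_get_number_list := by
  intro line y _
  unfold Spec_get_number_list
  exact main_eq line y
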